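-- pv_equiv track=rewrite | github.com/p-eduardo-medina/Python_Expert_Projects | LegalBlackLog.py | legalbacklog
-- ===== SOURCE A (Python) =====
-- def legalbacklog(cases, max_daily_sessions):
--     listSchedule = 0
--     while True:
--         subListSchedule = []
--         keysToDelete = []
--         numberofSesions = sum(cases.values())
--         if numberofSesions!=0:
--             for key,values in cases.items():
--                 if key in subListSchedule:
--                     listSchedule+=1
--                     subListSchedule = []
--                 if cases[key] > 0:
--                     subListSchedule.append(key)
--                     cases[key]-=1
--                     if cases[key] == 0: keysToDelete.append(key)
--                 if len(subListSchedule)>=max_daily_sessions or  sum(cases.values())==0 or key==(list(cases.keys()))[-1]: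
--                     listSchedule+=1
--                     break
--             for key in keysToDelete:
--                 del cases[key]
--         else:
--             return listSchedule
-- ===== SOURCE B (Python) =====
-- def legalbacklog(cases, max_daily_sessions):
--     vals = [v for v in cases.values() if v > 0]
--     days = 0
--     while vals:
--         batch = vals[:max_daily_sessions]
--         d = min(batch)
--         days += d
--         vals = [v - d for v in batch if v > d] + vals[max_daily_sessions:]
--     return days
-- ===== Notes on version B (the rewrite author's own statement) =====
-- stated objective: faster
-- what changed: A simulates the backlog day by day, rescanning the whole dict once per day; B keeps only the positive case loads, repeatedly takes the first max_daily_sessions of them and advances min(batch) days in one step, so its cost depends only on the number of cases, not on their magnitudes.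
-- outside the precondition, e.g. on legalbacklog({'a': -1, 'b': 1}, 2): A returns 0, B returns 1; on legalbacklog({'a': 2}, 0): A returns 2, B raises ValueError
import Mathlib
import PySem

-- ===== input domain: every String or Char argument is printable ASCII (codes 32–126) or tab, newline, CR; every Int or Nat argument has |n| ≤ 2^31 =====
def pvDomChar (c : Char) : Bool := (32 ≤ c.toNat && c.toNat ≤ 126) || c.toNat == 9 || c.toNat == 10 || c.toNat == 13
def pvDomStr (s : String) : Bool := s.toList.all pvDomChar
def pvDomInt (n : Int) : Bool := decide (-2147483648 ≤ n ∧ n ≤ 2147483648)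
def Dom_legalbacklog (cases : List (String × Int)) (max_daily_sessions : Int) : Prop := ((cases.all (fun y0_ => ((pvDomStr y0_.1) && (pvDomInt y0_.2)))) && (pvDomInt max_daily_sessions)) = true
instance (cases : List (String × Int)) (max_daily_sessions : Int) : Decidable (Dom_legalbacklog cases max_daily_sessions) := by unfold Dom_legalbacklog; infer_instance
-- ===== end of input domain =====

-- B replaces A's day-by-day simulation of the backlog with a batch advance over the positive
-- case loads (serve the first max_daily_sessions loads and jump min(batch) days at once), so the
-- running time no longer depends on the magnitude of the case values; A mutates its dict argument
-- (decrements and deletes entries), B does not — the equivalence proved here is about the return value.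


-- ===== PORT A =====
-- the dict 'cases' is the association list itself (unique keys; Pre_ requires this)

-- cases[key]  (getD-style; A only reads present keys)
def pvGetVal (d : List (String × Int)) (k : String) : Int :=
  match d with
  | [] => 0
  | (k', v) :: rest => if k' = k then v else pvGetVal rest k

-- cases[key] = v  (overwrite in place)
def pvSetVal (d : List (String × Int)) (k : String) (v : Int) : List (String × Int) :=
  match d with
  | [] => []
  | (k', v') :: rest => if k' = k then (k, v) :: rest else (k', v') :: pvSetVal rest k v

-- del cases[key]
def pvDelKey (d : List (String × Int)) (k : String) : List (String × Int) :=
  match d with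
  | [] => []
  | (k', v') :: rest => if k' = k then rest else (k', v') :: pvDelKey rest k

-- sum(cases.values())
def pvSumVals (d : List (String × Int)) : Int := (d.map Prod.snd).sum

-- (list(cases.keys()))[-1]
def pvLastKey? (d : List (String × Int)) : Option String := PySem.List.pyGet? (d.map Prod.fst) (-1)

-- the 'for key,values in cases.items():' loop (first argument = the items snapshot being iterated)
def pvInnerA (m : Int) : List (String × Int) → List (String × Int) → Int → List String → List String →
    (List (String × Int)) × Int × List String
  | [], d, ls, _, ktd => (d, ls, ktd)
  | (key, _) :: rest, d, ls, sub, ktd =>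
    let ls := if key ∈ sub then ls + 1 else ls
    let sub := if key ∈ sub then [] else sub
    let served := decide (pvGetVal d key > 0)
    let d := if served then pvSetVal d key (pvGetVal d key - 1) else d
    let sub := if served then sub ++ [key] else sub
    let ktd := if served && decide (pvGetVal d key = 0) then ktd ++ [key] else ktd
    if (sub.length : Int) ≥ m ∨ pvSumVals d = 0 ∨ pvLastKey? d = some key then
      (d, ls + 1, ktd)
    else
      pvInnerA m rest d ls sub ktd

-- the 'while True:' loop (fueled; under Pre_ the fuel chosen below is provably sufficient)
def pvOuterA (m : Int) : Nat → List (String × Int) → Int → Int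
  | 0, _, ls => ls
  | fuel + 1, d, ls =>
    if pvSumVals d ≠ 0 then
      let r := pvInnerA m d d ls [] []
      let d' := r.2.2.foldl (fun dd k => pvDelKey dd k) r.1
      pvOuterA m fuel d' r.2.1
    else ls

-- the Python parameter is a dict: build it from the association list (last value wins per key)
def legalbacklog (cases : List (String × Int)) (max_daily_sessions : Int) : Int :=
  let items := (PySem.Dict.ofList cases).items
  pvOuterA max_daily_sessions ((items.map (fun p : String × Int => max p.2 0)).sum.toNat + 1)
    items 0

-- ===== PORT B =====
-- two facts bLoop's termination measure needs (cited by name in decreasing_by)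
theorem pvSliceSplitLen (xs : List Int) (m : Int) :
    (PySem.List.slice xs none (some m)).length + (PySem.List.slice xs (some m) none).length
      = xs.length := by
  simp [PySem.List.slice, PySem.List.clampIdx]
  omega

theorem pvMinFilterLt (xs : List Int) (δ : Int) (h : PySem.List.min? xs id = some δ) :
    (xs.filter (fun v => decide (δ < v))).length < xs.length := by
  have hmem := PySem.List.min?_mem h
  rw [List.length_filter_lt_length_iff_exists]
  exact ⟨δ, hmem, by simp⟩

def pvBLoop (m : Int) (vals : List Int) (days : Int) : Int :=
  if vals = [] then days
  else
    let batch := PySem.List.slice vals none (some m)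
    match hm : PySem.List.min? batch id with
    | none => days  -- min([]) raises ValueError in Python; unreachable under Pre_
    | some δ =>
      pvBLoop m (((batch.filter (fun v => decide (δ < v))).map (fun v => v - δ))
                  ++ PySem.List.slice vals (some m) none) (days + δ)
termination_by vals.length
decreasing_by
  have h1 := pvSliceSplitLen vals m
  have h2 := pvMinFilterLt (PySem.List.slice vals none (some m)) δ hm
  simp only [List.length_append, List.length_map]
  omega

def legalbacklog_alt (cases : List (String × Int)) (max_daily_sessions : Int) : Int :=
  pvBLoop max_daily_sessions
    (((PySem.Dict.ofList cases).items.map Prod.snd).filter (fun v => decide (0 < v))) 0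

-- ===== PRECONDITION & SPEC =====
-- Pre_ excludes negative case values (A then loops forever except on accidental zero-sum inputs,
-- where it returns 0 without scheduling anything) and max_daily_sessions < 1 when a positive
-- case load is present (a nonsensical capacity on which A loops forever or degenerates to
-- serving only the first key, while B's min of an empty batch raises ValueError).
def Pre_legalbacklog (cases : List (String × Int)) (max_daily_sessions : Int) : Prop :=
  (∀ p ∈ cases, 0 ≤ p.2) ∧ (1 ≤ max_daily_sessions ∨ ∀ p ∈ cases, p.2 ≤ 0)
instance (cases : List (String × Int)) (max_daily_sessions : Int) : Decidable (Pre_legalbacklog cases max_daily_sessions) := by unfold Pre_legalbacklog; infer_instance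

def pvWitness_legalbacklog : (List (String × Int)) × Int := ([("a", 2), ("b", 1), ("c", 0)], 2)


def Spec_legalbacklog (cases : List (String × Int)) (max_daily_sessions : Int) (out : Int) : Prop := out = legalbacklog_alt cases max_daily_sessions
instance (cases : List (String × Int)) (max_daily_sessions : Int) (out : Int) : Decidable (Spec_legalbacklog cases max_daily_sessions out) := by unfold Spec_legalbacklog; infer_instance

-- ===== CLAIM (what is proved, stated in full; the proofs are below) =====
def Claim_equal_legalbacklog : Prop := ∀ (cases : List (String × Int)) (max_daily_sessions : Int), Dom_legalbacklog cases max_daily_sessions → Pre_legalbacklog cases max_daily_sessions → Spec_legalbacklog cases max_daily_sessions (legalbacklog cases max_daily_sessions)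

-- ===== LEMMAS AND PROOFS =====

-- the positive case loads, in dict order (the common abstraction of both programs' states)
def pvPos (d : List (String × Int)) : List Int := (d.map Prod.snd).filter (fun v => decide (0 < v))

-- one day of A, seen on the positive loads: decrement the first k, keep the still-positive ones
def pvStep (k : Nat) (vs : List Int) : List Int :=
  (((vs.take k).map (fun v => v - 1)).filter (fun v => decide (0 < v))) ++ vs.drop k

def pvNatSum (vs : List Int) : Nat := (vs.map Int.toNat).sum

-- day-by-day reference loop (fuel ≥ pvNatSum vs + 1 is always enough)
def pvDayIter (k : Nat) : Nat → List Int → Int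
  | 0, _ => 0
  | f + 1, vs => if vs = [] then 0 else 1 + pvDayIter k f (pvStep k vs)

def pvDays (k : Nat) (vs : List Int) : Int := pvDayIter k (pvNatSum vs + 1) vs

-- what one pass of A's inner loop does to the dict when it still has capacity k ≥ 1
def pvSrv : Nat → List (String × Int) → List (String × Int)
  | _, [] => []
  | k, (key, v) :: rest =>
    if 0 < v then
      if k ≤ 1 then (key, v - 1) :: rest
      else (key, v - 1) :: pvSrv (k - 1) rest
    else (key, v) :: pvSrv k rest

theorem pvNatSum_append (a b : List Int) : pvNatSum (a ++ b) = pvNatSum a + pvNatSum b := by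
  simp [pvNatSum]

theorem pvNatSum_filter_pos (vs : List Int) :
    pvNatSum (vs.filter (fun v => decide (0 < v))) = pvNatSum vs := by
  induction vs with
  | nil => rfl
  | cons v rest ih =>
    by_cases h : 0 < v
    · simp [pvNatSum, h] at ih ⊢; omega
    · simp [pvNatSum, h] at ih ⊢; omega

theorem pvLen_le_natSum (vs : List Int) (h : ∀ v ∈ vs, 0 < v) :
    vs.length ≤ pvNatSum vs := by
  induction vs with
  | nil => simp [pvNatSum]
  | cons v rest ih =>
    have hv := h v (by simp)
    have := ih (fun x hx => h x (by simp [hx]))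
    simp [pvNatSum] at *
    omega

theorem pvNatSum_map_sub_one (vs : List Int) (h : ∀ v ∈ vs, 0 < v) :
    pvNatSum (vs.map (fun v => v - 1)) = pvNatSum vs - vs.length := by
  induction vs with
  | nil => rfl
  | cons v rest ih =>
    have hv := h v (by simp)
    have hrest := fun x hx => h x (List.mem_cons_of_mem _ hx)
    have hlen := pvLen_le_natSum rest hrest
    have := ih hrest
    simp [pvNatSum] at *
    omega

theorem pvStep_pos (k : Nat) (vs : List Int) (h : ∀ v ∈ vs, 0 < v) :
    ∀ v ∈ pvStep k vs, 0 < v := by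
  intro v hv
  rcases List.mem_append.mp hv with h1 | h2
  · simpa using (List.mem_filter.mp h1).2
  · exact h v (List.mem_of_mem_drop h2)

theorem pvNatSum_step_lt (k : Nat) (vs : List Int) (h : ∀ v ∈ vs, 0 < v)
    (hk : 1 ≤ k) (hne : vs ≠ []) : pvNatSum (pvStep k vs) < pvNatSum vs := by
  have htake : ∀ v ∈ vs.take k, 0 < v := fun v hv => h v (List.mem_of_mem_take hv)
  have h1 : pvNatSum (pvStep k vs)
      = pvNatSum (vs.take k) - (vs.take k).length + pvNatSum (vs.drop k) := by
    rw [pvStep, pvNatSum_append, pvNatSum_filter_pos, pvNatSum_map_sub_one _ htake]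
  have h2 : pvNatSum (vs.take k) + pvNatSum (vs.drop k) = pvNatSum vs := by
    rw [← pvNatSum_append, List.take_append_drop]
  have h3 : 1 ≤ (vs.take k).length := by
    rw [List.length_take]
    have : vs.length ≠ 0 := fun hl => hne (List.length_eq_zero_iff.mp hl)
    omega
  have h4 := pvLen_le_natSum (vs.take k) htake
  omega

theorem pvDayIter_fuel (k : Nat) (hk : 1 ≤ k) :
    ∀ f f' vs, (∀ v ∈ vs, 0 < v) → pvNatSum vs < f → pvNatSum vs < f' →
      pvDayIter k f vs = pvDayIter k f' vs := by
  intro f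
  induction f with
  | zero => intro f' vs _ hf _; omega
  | succ f ih =>
    intro f' vs hpos hf hf'
    obtain ⟨f'', rfl⟩ : ∃ f'', f' = f'' + 1 := ⟨f' - 1, by omega⟩
    by_cases hvs : vs = []
    · simp [pvDayIter, hvs]
    · simp only [pvDayIter, hvs]
      have hlt := pvNatSum_step_lt k vs hpos hk hvs
      rw [ih f'' (pvStep k vs) (pvStep_pos k vs hpos) (by omega) (by omega)]

theorem pvDays_nil (k : Nat) : pvDays k [] = 0 := by
  simp [pvDays, pvDayIter]

theorem pvDays_step (k : Nat) (vs : List Int) (hk : 1 ≤ k) (h : ∀ v ∈ vs, 0 < v)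
    (hne : vs ≠ []) : pvDays k vs = 1 + pvDays k (pvStep k vs) := by
  have hlt := pvNatSum_step_lt k vs h hk hne
  unfold pvDays
  conv_lhs => rw [pvDayIter]
  rw [if_neg hne,
    pvDayIter_fuel k hk (pvNatSum vs) (pvNatSum (pvStep k vs) + 1) (pvStep k vs)
      (pvStep_pos k vs h) (by omega) (by omega)]

-- ---- assoc-list dict facts ----

theorem pvGetVal_append_left (a b : List (String × Int)) (k : String)
    (h : k ∈ a.map Prod.fst) : pvGetVal (a ++ b) k = pvGetVal a k := by
  induction a with
  | nil => simp at h
  | cons p a ih =>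
    obtain ⟨k', v'⟩ := p
    by_cases hk : k' = k
    · simp [pvGetVal, hk]
    · have h' : k = k' ∨ k ∈ a.map Prod.fst := by simpa using h
      simp only [List.cons_append, pvGetVal, if_neg hk]
      exact ih (h'.resolve_left (fun e => hk e.symm))

theorem pvGetVal_append_head (a rest : List (String × Int)) (k : String) (v : Int)
    (h : k ∉ a.map Prod.fst) : pvGetVal (a ++ (k, v) :: rest) k = v := by
  induction a with
  | nil => simp [pvGetVal]
  | cons p a ih =>
    obtain ⟨k', v'⟩ := p
    have h1 : k' ≠ k := fun e => h (by simp [e])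
    have h2 : k ∉ a.map Prod.fst := fun m => h (by simp [m])
    simp only [List.cons_append, pvGetVal, if_neg h1]
    exact ih h2

theorem pvSetVal_append_head (a rest : List (String × Int)) (k : String) (v w : Int)
    (h : k ∉ a.map Prod.fst) :
    pvSetVal (a ++ (k, v) :: rest) k w = a ++ (k, w) :: rest := by
  induction a with
  | nil => simp [pvSetVal]
  | cons p a ih =>
    obtain ⟨k', v'⟩ := p
    have h1 : k' ≠ k := fun e => h (by simp [e])
    have h2 : k ∉ a.map Prod.fst := fun m => h (by simp [m])
    simp only [List.cons_append, pvSetVal, if_neg h1]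
    rw [ih h2]

theorem pvDelKey_sublist (d : List (String × Int)) (k : String) :
    (pvDelKey d k).Sublist d := by
  induction d with
  | nil => simp [pvDelKey]
  | cons p d ih =>
    obtain ⟨k', v'⟩ := p
    by_cases hk : k' = k
    · simpa [pvDelKey, hk] using List.sublist_cons_self (k', v') d
    · simp only [pvDelKey, if_neg hk]
      exact List.Sublist.cons₂ _ ih

theorem pvGetVal_not_mem (d : List (String × Int)) (k : String)
    (h : k ∉ d.map Prod.fst) : pvGetVal d k = 0 := by
  induction d with
  | nil => rfl
  | cons p d ih =>
    obtain ⟨k', v'⟩ := p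
    have h1 : k' ≠ k := fun e => h (by simp [e])
    have h2 : k ∉ d.map Prod.fst := fun m => h (by simp [m])
    simp only [pvGetVal, if_neg h1]
    exact ih h2

theorem pvGetVal_delKey (d : List (String × Int)) (k t : String)
    (hn : (d.map Prod.fst).Nodup) (h : pvGetVal d k = 0) :
    pvGetVal (pvDelKey d t) k = 0 := by
  induction d with
  | nil => simp [pvDelKey, pvGetVal]
  | cons p d ih =>
    obtain ⟨k', v'⟩ := p
    rw [List.map_cons] at hn
    obtain ⟨hnotin, hn⟩ := List.nodup_cons.mp hn
    by_cases ht : k' = t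
    · simp only [pvDelKey, if_pos ht]
      by_cases hk : k' = k
      · subst hk
        exact pvGetVal_not_mem d k' hnotin
      · simpa [pvGetVal, hk] using h
    · simp only [pvDelKey, if_neg ht]
      by_cases hk : k' = k
      · simpa [pvGetVal, hk] using h
      · simp only [pvGetVal, if_neg hk] at h ⊢
        exact ih hn h

theorem pvPos_delKey (d : List (String × Int)) (k : String)
    (hn : (d.map Prod.fst).Nodup) (h : pvGetVal d k = 0) :
    pvPos (pvDelKey d k) = pvPos d := by
  induction d with
  | nil => rfl
  | cons p d ih =>
    obtain ⟨k', v'⟩ := p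
    rw [List.map_cons] at hn
    obtain ⟨hnotin, hn⟩ := List.nodup_cons.mp hn
    by_cases hk : k' = k
    · have hv : v' = 0 := by simpa [pvGetVal, hk] using h
      simp [pvDelKey, hk, pvPos, List.filter_cons, hv]
    · simp only [pvGetVal, if_neg hk] at h
      simp only [pvDelKey, if_neg hk]
      simp only [pvPos, List.map_cons, List.filter_cons]
      rw [show ((pvDelKey d k).map Prod.snd).filter (fun v => decide (0 < v))
            = (d.map Prod.snd).filter (fun v => decide (0 < v)) from ih hn h]

-- ---- pvSrv facts ----

theorem pvSrv_keys (k : Nat) (l : List (String × Int)) :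
    (pvSrv k l).map Prod.fst = l.map Prod.fst := by
  induction l generalizing k with
  | nil => rfl
  | cons p l ih =>
    obtain ⟨key, v⟩ := p
    by_cases hv : 0 < v
    · by_cases hk : k ≤ 1
      · simp [pvSrv, hv, hk]
      · simp [pvSrv, hv, hk, ih]
    · simp [pvSrv, hv, ih]

theorem pvSrv_nonneg (k : Nat) (l : List (String × Int)) (h : ∀ p ∈ l, 0 ≤ p.2) :
    ∀ p ∈ pvSrv k l, 0 ≤ p.2 := by
  induction l generalizing k with
  | nil => simp [pvSrv]
  | cons p l ih =>
    obtain ⟨key, v⟩ := p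
    have hv0 := h (key, v) (by simp)
    have hl := fun q hq => h q (List.mem_cons_of_mem _ hq)
    by_cases hv : 0 < v
    · by_cases hk : k ≤ 1
      · intro q hq
        rcases (by simpa [pvSrv, hv, hk] using hq : q = (key, v - 1) ∨ q ∈ l) with rfl | hql
        · simp; omega
        · exact hl q hql
      · intro q hq
        rcases (by simpa [pvSrv, hv, hk] using hq : q = (key, v - 1) ∨ q ∈ pvSrv (k - 1) l)
          with rfl | hql
        · simp; omega
        · exact ih (k - 1) hl q hql
    · intro q hq
      rcases (by simpa [pvSrv, hv] using hq : q = (key, v) ∨ q ∈ pvSrv k l) with rfl | hql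
      · simpa using hv0
      · exact ih k hl q hql

theorem pvSrv_zero_tail (k : Nat) (l : List (String × Int)) (h : ∀ p ∈ l, p.2 ≤ 0) :
    pvSrv k l = l := by
  induction l generalizing k with
  | nil => rfl
  | cons p l ih =>
    obtain ⟨key, v⟩ := p
    have hv : ¬ 0 < v := by have := h (key, v) (by simp); simp at this ⊢; omega
    simp [pvSrv, hv, ih k (fun q hq => h q (List.mem_cons_of_mem _ hq))]

theorem pvPos_srv (k : Nat) (l : List (String × Int)) (hk : 1 ≤ k) :
    pvPos (pvSrv k l) =
      (((pvPos l).take k).map (fun v => v - 1)).filter (fun v => decide (0 < v))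
        ++ (pvPos l).drop k := by
  induction l generalizing k with
  | nil => simp [pvSrv, pvPos]
  | cons p l ih =>
    obtain ⟨key, v⟩ := p
    by_cases hv : 0 < v
    · have hpos : pvPos ((key, v) :: l) = v :: pvPos l := by simp [pvPos, List.filter_cons, hv]
      have hcons : ∀ (w : Int) (t : List (String × Int)), pvPos ((key, w) :: t)
          = (if 0 < w then [w] else []) ++ pvPos t := by
        intro w t; by_cases hw : 0 < w <;> simp [pvPos, List.filter_cons, hw]
      by_cases hk1 : k ≤ 1
      · have hk1' : k = 1 := by omega
        subst hk1'
        simp only [pvSrv, if_pos hv, if_pos (le_refl 1)]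
        rw [hcons, hpos]
        simp only [List.take_succ_cons, List.take_zero, List.drop_succ_cons, List.drop_zero,
          List.map_cons, List.map_nil, List.filter_cons, List.filter_nil]
        by_cases hp : 0 < v - 1 <;> simp [hp]
      · obtain ⟨k', rfl, hk'1⟩ : ∃ k', k = k' + 1 ∧ 1 ≤ k' := ⟨k - 1, by omega⟩
        have hrec := ih k' hk'1
        simp only [pvSrv, if_pos hv, if_neg hk1, Nat.add_sub_cancel]
        rw [hcons, hrec, hpos]
        simp only [List.take_succ_cons, List.drop_succ_cons, List.map_cons, List.filter_cons]
        by_cases hp : 1 < v <;> simp [hp]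
    · have hpos : pvPos ((key, v) :: l) = pvPos l := by simp [pvPos, List.filter_cons, hv]
      simp only [pvSrv, if_neg hv]
      have : pvPos ((key, v) :: pvSrv k l) = pvPos (pvSrv k l) := by
        simp [pvPos, List.filter_cons, hv]
      rw [this, hpos, ih k hk]

-- ---- A's inner loop = pvSrv on the unprocessed suffix ----

theorem pvSum_zero_iff (d : List (String × Int)) (h : ∀ p ∈ d, 0 ≤ p.2) :
    pvSumVals d = 0 ↔ pvPos d = [] := by
  induction d with
  | nil => simp [pvSumVals, pvPos]
  | cons p d ih =>
    obtain ⟨k', v'⟩ := p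
    have hv := h (k', v') (by simp)
    have hrest := fun q hq => h q (List.mem_cons_of_mem _ hq)
    have hsum : 0 ≤ pvSumVals d := by
      apply List.sum_nonneg
      intro x hx
      obtain ⟨q, hq, rfl⟩ := List.mem_map.mp hx
      exact hrest q hq
    have := ih hrest
    simp only [pvSumVals, pvPos, List.map_cons, List.sum_cons, List.filter_cons] at *
    by_cases hp : 0 < v'
    · (try simp only [decide_eq_true_eq] at *)
      rw [if_pos hp]
      constructor
      · intro he; omega
      · intro he; simp at he
    · (try simp only [decide_eq_true_eq] at *)
      rw [if_neg hp]
      have hv0 : v' = 0 := by omega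
      constructor
      · intro he; exact this.mp (by omega)
      · intro he; have := this.mpr he; omega

theorem pvLastKey?_eq (d : List (String × Int)) : pvLastKey? d = (d.map Prod.fst).getLast? := by
  unfold pvLastKey?
  rw [List.getLast?_eq_getElem?]
  set l := d.map Prod.fst with hl
  simp only [PySem.List.pyGet?, PySem.List.pyIdx?]
  by_cases h : l.length = 0
  · simp [h]
  · have h2 : -(l.length : Int) ≤ -1 := by omega
    simp [h2]

theorem pvLast_break (done rest : List (String × Int)) (key : String) (w : Int)
    (hkr : key ∉ rest.map Prod.fst)
    (h : pvLastKey? (done ++ (key, w) :: rest) = some key) : rest = [] := by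
  by_contra hne
  rw [pvLastKey?_eq] at h
  have hrk : rest.map Prod.fst ≠ [] := fun he => hne (List.map_eq_nil_iff.mp he)
  rcases hx : (rest.map Prod.fst).getLast? with _ | a
  · exact hrk (List.getLast?_eq_none_iff.mp hx)
  · have hmem := List.mem_of_getLast? hx
    apply hkr
    have ha : a = key := by
      rw [List.map_append, List.map_cons, List.getLast?_append, List.getLast?_cons, hx] at h
      simpa using h
    rwa [ha] at hmem

theorem pvLast_single (done : List (String × Int)) (key : String) (w : Int) :
    pvLastKey? (done ++ [(key, w)]) = some key := by
  rw [pvLastKey?_eq, List.map_append, List.map_cons, List.map_nil, List.getLast?_concat]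

theorem pvAllZero (X : List (String × Int)) (hv : ∀ p ∈ X, 0 ≤ p.2)
    (hs : pvSumVals X = 0) : ∀ p ∈ X, p.2 ≤ 0 := by
  have hnil := (pvSum_zero_iff X hv).mp hs
  intro p hp
  by_contra hpos
  have : p.2 ∈ pvPos X := by
    apply List.mem_filter.mpr
    exact ⟨List.mem_map.mpr ⟨p, hp, rfl⟩, by simpa using lt_of_not_ge hpos⟩
  rw [hnil] at this
  exact absurd this (List.not_mem_nil)

theorem pvInnerA_srv (m : Int) (hm : 1 ≤ m) :
    ∀ (rest done : List (String × Int)) (sub ktd : List String) (ls : Int),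
    ((done ++ rest).map Prod.fst).Nodup →
    (∀ p ∈ done ++ rest, 0 ≤ p.2) →
    (∀ s ∈ sub, s ∈ done.map Prod.fst) →
    sub.length < m.toNat →
    (∀ s ∈ ktd, s ∈ done.map Prod.fst ∧ pvGetVal done s = 0) →
    rest ≠ [] →
    ∃ ktd', pvInnerA m rest (done ++ rest) ls sub ktd
        = (done ++ pvSrv (m.toNat - sub.length) rest, ls + 1, ktd')
      ∧ ∀ s ∈ ktd', pvGetVal (done ++ pvSrv (m.toNat - sub.length) rest) s = 0 := by
  intro rest
  induction rest with
  | nil => intro done sub ktd ls _ _ _ _ _ hne; exact absurd rfl hne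
  | cons p rest ih =>
    intro done sub ktd ls hn hv hsub hcap hktd _
    obtain ⟨key, v⟩ := p
    have hkeys : (done ++ (key, v) :: rest).map Prod.fst
        = done.map Prod.fst ++ key :: rest.map Prod.fst := by simp
    obtain ⟨hnd, hnkr, hdisj⟩ := List.nodup_append.mp (hkeys ▸ hn)
    have hkey_done : key ∉ done.map Prod.fst := fun hmem => hdisj key hmem key (by simp) rfl
    have hkey_rest : key ∉ rest.map Prod.fst := (List.nodup_cons.mp hnkr).1
    have hkey_sub : key ∉ sub := fun hin => hkey_done (hsub key hin)
    have hget : pvGetVal (done ++ (key, v) :: rest) key = v :=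
      pvGetVal_append_head _ _ _ _ hkey_done
    have hv0 : 0 ≤ v := by simpa using hv (key, v) (by simp)
    have hvrest : ∀ p ∈ rest, 0 ≤ p.2 := fun q hq => hv q (by simp [hq])
    have hvdone : ∀ p ∈ done, 0 ≤ p.2 := fun q hq => hv q (by simp [hq])
    set K := m.toNat - sub.length with hK
    have hK1 : 1 ≤ K := by omega
    by_cases hvpos : 0 < v
    · -- the key is served
      have hserved : decide (pvGetVal (done ++ (key, v) :: rest) key > 0) = true := by
        rw [hget]; simpa using hvpos
      have hset : pvSetVal (done ++ (key, v) :: rest) key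
            (pvGetVal (done ++ (key, v) :: rest) key - 1) = done ++ (key, v - 1) :: rest := by
        rw [hget]; exact pvSetVal_append_head _ _ _ _ _ hkey_done
      have hget' : pvGetVal (done ++ (key, v - 1) :: rest) key = v - 1 :=
        pvGetVal_append_head _ _ _ _ hkey_done
      have hv1 : ∀ p ∈ done ++ (key, v - 1) :: rest, 0 ≤ p.2 := by
        intro q hq
        rcases List.mem_append.mp hq with h | h
        · exact hvdone q h
        · rcases List.mem_cons.mp h with rfl | h
          · simp; omega
          · exact hvrest q h
      -- the ktd list after this iteration
      set ktd₂ := if v - 1 = 0 then ktd ++ [key] else ktd with hktd₂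
      have hktdsub : ∀ s ∈ ktd₂, (s ∈ done.map Prod.fst ∨ s = key)
          ∧ pvGetVal (done ++ [(key, v - 1)]) s = 0 := by
        intro s hs
        have hof : ∀ s ∈ ktd, (s ∈ done.map Prod.fst ∨ s = key)
            ∧ pvGetVal (done ++ [(key, v - 1)]) s = 0 := by
          intro s' hs'
          obtain ⟨hm1, hm2⟩ := hktd s' hs'
          exact ⟨Or.inl hm1, by rw [pvGetVal_append_left _ _ _ hm1]; exact hm2⟩
        rw [hktd₂] at hs
        by_cases hz : v - 1 = 0
        · rw [if_pos hz] at hs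
          rcases List.mem_append.mp hs with h | h
          · exact hof s h
          · have : s = key := by simpa using h
            subst this
            refine ⟨Or.inr rfl, ?_⟩
            rw [pvGetVal_append_head _ _ _ _ hkey_done]
            exact hz
        · rw [if_neg hz] at hs
          exact hof s hs
      have hstep1 : pvInnerA m ((key, v) :: rest) (done ++ (key, v) :: rest) ls sub ktd
          = (if ((sub ++ [key]).length : Int) ≥ m
                ∨ pvSumVals (done ++ (key, v - 1) :: rest) = 0
                ∨ pvLastKey? (done ++ (key, v - 1) :: rest) = some key then
              (done ++ (key, v - 1) :: rest, ls + 1, ktd₂)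
            else
              pvInnerA m rest (done ++ (key, v - 1) :: rest) ls (sub ++ [key]) ktd₂) := by
        simp only [pvInnerA, if_neg hkey_sub, hserved, if_true, hset, hget', Bool.true_and,
          hktd₂, decide_eq_true_eq]
      by_cases hfull : ((sub ++ [key]).length : Int) ≥ m
      · -- capacity reached: break
        have hKle : K ≤ 1 := by simp at hfull; omega
        have hsrv : pvSrv K ((key, v) :: rest) = (key, v - 1) :: rest := by
          rw [pvSrv, if_pos hvpos, if_pos hKle]
        refine ⟨ktd₂, ?_, ?_⟩
        · rw [hstep1, if_pos (Or.inl hfull), hsrv]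
        · intro s hs
          obtain ⟨hm1, hm2⟩ := hktdsub s hs
          rw [hsrv]
          rcases hm1 with h | rfl
          · rw [pvGetVal_append_left _ _ _ h]
            rwa [pvGetVal_append_left _ _ _ h] at hm2
          · rw [pvGetVal_append_head _ _ _ _ hkey_done]
            rwa [pvGetVal_append_head _ _ _ _ hkey_done] at hm2
      · have hKge : 2 ≤ K := by simp at hfull; omega
        have hsrv2 : pvSrv K ((key, v) :: rest) = (key, v - 1) :: pvSrv (K - 1) rest := by
          rw [pvSrv, if_pos hvpos, if_neg (by omega : ¬ K ≤ 1)]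
        by_cases hzero : pvSumVals (done ++ (key, v - 1) :: rest) = 0
        · -- everything is finished: break, remaining suffix is all zero
          have hz := pvAllZero _ hv1 hzero
          have hsrv0 : pvSrv (K - 1) rest = rest :=
            pvSrv_zero_tail _ _ (fun q hq => hz q (by simp [hq]))
          refine ⟨ktd₂, ?_, ?_⟩
          · rw [hstep1, if_pos (Or.inr (Or.inl hzero)), hsrv2, hsrv0]
          · intro s hs
            obtain ⟨hm1, hm2⟩ := hktdsub s hs
            rw [hsrv2, hsrv0]
            rcases hm1 with h | rfl
            · rw [pvGetVal_append_left _ _ _ h]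
              rwa [pvGetVal_append_left _ _ _ h] at hm2
            · rw [pvGetVal_append_head _ _ _ _ hkey_done]
              rwa [pvGetVal_append_head _ _ _ _ hkey_done] at hm2
        · by_cases hlast : pvLastKey? (done ++ (key, v - 1) :: rest) = some key
          · -- last key of the dict: break, and rest = []
            have hrnil : rest = [] := pvLast_break done rest key (v - 1) hkey_rest hlast
            subst hrnil
            have hsrv1 : pvSrv K [(key, v)] = [(key, v - 1)] := by
              rw [pvSrv, if_pos hvpos, if_neg (by omega : ¬ K ≤ 1)]
              rfl
            refine ⟨ktd₂, ?_, ?_⟩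
            · rw [hstep1, if_pos (Or.inr (Or.inr hlast)), hsrv1]
            · intro s hs
              obtain ⟨hm1, hm2⟩ := hktdsub s hs
              rw [hsrv1]
              rcases hm1 with h | rfl
              · rw [pvGetVal_append_left _ _ _ h]
                rwa [pvGetVal_append_left _ _ _ h] at hm2
              · rw [pvGetVal_append_head _ _ _ _ hkey_done]
                rwa [pvGetVal_append_head _ _ _ _ hkey_done] at hm2
          · -- keep scanning
            have hrne : rest ≠ [] := by
              intro hrnil
              subst hrnil
              exact hlast (pvLast_single done key (v - 1))
            have hassoc : (done ++ [(key, v - 1)]) ++ rest = done ++ (key, v - 1) :: rest := by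
              simp
            obtain ⟨ktd', heq, hprop⟩ := ih (done ++ [(key, v - 1)]) (sub ++ [key]) ktd₂ ls
              (by rw [hassoc]
                  have : ((done ++ (key, v - 1) :: rest).map Prod.fst)
                      = (done ++ (key, v) :: rest).map Prod.fst := by simp
                  rw [this]; exact hn)
              (by rw [hassoc]; exact hv1)
              (by intro s hs
                  rcases List.mem_append.mp hs with h | h
                  · simp only [List.map_append]
                    exact List.mem_append.mpr (Or.inl (hsub s h))
                  · have : s = key := by simpa using h
                    subst this
                    simp)
              (by simp at hfull ⊢; omega)
              (by intro s hs
                  obtain ⟨hm1, hm2⟩ := hktdsub s hs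
                  constructor
                  · rcases hm1 with h | rfl
                    · simp only [List.map_append]
                      exact List.mem_append.mpr (Or.inl h)
                    · simp
                  · exact hm2)
              hrne
            rw [hassoc] at heq
            have hlen : (sub ++ [key]).length = sub.length + 1 := by simp
            rw [hlen] at heq hprop
            have hKm : m.toNat - (sub.length + 1) = K - 1 := by omega
            rw [hKm] at heq hprop
            have halign : (done ++ [(key, v - 1)]) ++ pvSrv (K - 1) rest
                = done ++ pvSrv K ((key, v) :: rest) := by
              rw [hsrv2]; simp
            refine ⟨ktd', ?_, ?_⟩
            · rw [hstep1, if_neg (by simp only [not_or]; exact ⟨hfull, hzero, hlast⟩), heq, halign]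
            · intro s hs
              have := hprop s hs
              rwa [halign] at this
    · -- value 0: nothing served at this key
      have hserved : decide (pvGetVal (done ++ (key, v) :: rest) key > 0) = false := by
        rw [hget]; simpa using hvpos
      have hstep1 : pvInnerA m ((key, v) :: rest) (done ++ (key, v) :: rest) ls sub ktd
          = (if (sub.length : Int) ≥ m
                ∨ pvSumVals (done ++ (key, v) :: rest) = 0
                ∨ pvLastKey? (done ++ (key, v) :: rest) = some key then
              (done ++ (key, v) :: rest, ls + 1, ktd)
            else
              pvInnerA m rest (done ++ (key, v) :: rest) ls sub ktd) := by
        simp only [pvInnerA, if_neg hkey_sub, hserved, if_false, Bool.false_and,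
          Bool.false_eq_true]
      have hnotfull : ¬ ((sub.length : Int) ≥ m) := by
        have := hcap
        omega
      have hktdget : ∀ s ∈ ktd, pvGetVal (done ++ (key, v) :: pvSrv K rest) s = 0 ∧
          pvGetVal (done ++ (key, v) :: rest) s = 0 := by
        intro s hs
        obtain ⟨hm1, hm2⟩ := hktd s hs
        rw [pvGetVal_append_left _ _ _ hm1, pvGetVal_append_left _ _ _ hm1]
        exact ⟨hm2, hm2⟩
      by_cases hzero : pvSumVals (done ++ (key, v) :: rest) = 0
      · have hz := pvAllZero _ hv hzero
        have hsrv0 : pvSrv K rest = rest :=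
          pvSrv_zero_tail _ _ (fun q hq => hz q (by simp [hq]))
        have hsrv : pvSrv K ((key, v) :: rest) = (key, v) :: rest := by
          rw [pvSrv, if_neg hvpos, hsrv0]
        refine ⟨ktd, ?_, ?_⟩
        · rw [hstep1, if_pos (Or.inr (Or.inl hzero)), hsrv]
        · intro s hs
          rw [hsrv]
          exact (hktdget s hs).2
      · by_cases hlast : pvLastKey? (done ++ (key, v) :: rest) = some key
        · have hrnil : rest = [] := pvLast_break done rest key v hkey_rest hlast
          subst hrnil
          have hsrv : pvSrv K [(key, v)] = [(key, v)] := by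
            rw [pvSrv, if_neg hvpos]
            rfl
          refine ⟨ktd, ?_, ?_⟩
          · rw [hstep1, if_pos (Or.inr (Or.inr hlast)), hsrv]
          · intro s hs
            rw [hsrv]
            exact (hktdget s hs).2
        · have hrne : rest ≠ [] := by
            intro hrnil
            subst hrnil
            exact hlast (pvLast_single done key v)
          have hassoc : (done ++ [(key, v)]) ++ rest = done ++ (key, v) :: rest := by simp
          obtain ⟨ktd', heq, hprop⟩ := ih (done ++ [(key, v)]) sub ktd ls
            (by rw [hassoc]; exact hn)
            (by rw [hassoc]; exact hv)
            (by intro s hs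
                simp only [List.map_append]
                exact List.mem_append.mpr (Or.inl (hsub s hs)))
            (by simpa using hcap)
            (by intro s hs
                obtain ⟨hm1, hm2⟩ := hktd s hs
                constructor
                · simp only [List.map_append]
                  exact List.mem_append.mpr (Or.inl hm1)
                · rw [pvGetVal_append_left _ _ _ hm1]
                  exact hm2)
            hrne
          rw [hassoc] at heq
          have hKm : m.toNat - sub.length = K := rfl
          have halign : (done ++ [(key, v)]) ++ pvSrv K rest
              = done ++ pvSrv K ((key, v) :: rest) := by
            rw [pvSrv, if_neg hvpos]
            simp
          refine ⟨ktd', ?_, ?_⟩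
          · rw [hstep1, if_neg (by simp only [not_or]; exact ⟨hnotfull, hzero, hlast⟩), heq, halign]
          · intro s hs
            have := hprop s hs
            rwa [halign] at this

theorem pvDelFold (F : List (String × Int)) (L : List String)
    (hn : (F.map Prod.fst).Nodup) (h0 : ∀ s ∈ L, pvGetVal F s = 0) :
    pvPos (L.foldl (fun dd k => pvDelKey dd k) F) = pvPos F
      ∧ ((L.foldl (fun dd k => pvDelKey dd k) F).map Prod.fst).Nodup
      ∧ ∀ p ∈ L.foldl (fun dd k => pvDelKey dd k) F, p ∈ F := by
  induction L generalizing F with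
  | nil => exact ⟨rfl, hn, fun p hp => hp⟩
  | cons t L ih =>
    have hsub := pvDelKey_sublist F t
    have hn' : ((pvDelKey F t).map Prod.fst).Nodup := (hsub.map Prod.fst).nodup hn
    have h0' : ∀ s ∈ L, pvGetVal (pvDelKey F t) s = 0 := fun s hs =>
      pvGetVal_delKey F s t hn (h0 s (List.mem_cons_of_mem _ hs))
    obtain ⟨hp1, hp2, hp3⟩ := ih (pvDelKey F t) hn' h0'
    refine ⟨?_, hp2, fun p hp => hsub.mem (hp3 p hp)⟩
    simp only [List.foldl_cons] at *
    rw [hp1, pvPos_delKey F t hn (h0 t (by simp))]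

-- one full pass of A's while-body
theorem pvPassA (m : Int) (hm : 1 ≤ m) (d : List (String × Int)) (ls : Int)
    (hn : (d.map Prod.fst).Nodup) (hv : ∀ p ∈ d, 0 ≤ p.2) (hs : pvSumVals d ≠ 0) :
    ∃ d'', (let r := pvInnerA m d d ls [] [];
            r.2.2.foldl (fun dd k => pvDelKey dd k) r.1 = d'' ∧ r.2.1 = ls + 1)
      ∧ pvPos d'' = pvStep m.toNat (pvPos d)
      ∧ ((d''.map Prod.fst)).Nodup ∧ ∀ p ∈ d'', 0 ≤ p.2 := by
  have hne : d ≠ [] := by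
    intro he
    subst he
    exact hs rfl
  have hk : 1 ≤ m.toNat := by omega
  obtain ⟨ktd', heq, hktd⟩ := pvInnerA_srv m hm d [] [] [] ls hn hv (by simp)
    (by simp only [List.length_nil]; omega) (by simp) hne
  simp only [List.nil_append, List.length_nil, Nat.sub_zero] at heq hktd
  have hnF : ((pvSrv m.toNat d).map Prod.fst).Nodup := by rw [pvSrv_keys]; exact hn
  have hvF : ∀ p ∈ pvSrv m.toNat d, 0 ≤ p.2 := pvSrv_nonneg _ _ hv
  obtain ⟨hp1, hp2, hp3⟩ := pvDelFold (pvSrv m.toNat d) ktd' hnF hktd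
  refine ⟨ktd'.foldl (fun dd k => pvDelKey dd k) (pvSrv m.toNat d), ⟨?_, ?_⟩, ?_, hp2,
    fun p hp => hvF p (hp3 p hp)⟩
  · simp only [heq]
  · simp only [heq]
  · rw [hp1, pvPos_srv m.toNat d hk]
    rfl

theorem pvOuterA_days (m : Int) (hm : 1 ≤ m) :
    ∀ (f : Nat) (d : List (String × Int)) (ls : Int),
    (d.map Prod.fst).Nodup → (∀ p ∈ d, 0 ≤ p.2) → pvNatSum (pvPos d) < f →
    pvOuterA m f d ls = ls + pvDayIter m.toNat f (pvPos d) := by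
  intro f
  induction f with
  | zero => intro d ls _ _ hf; omega
  | succ f ih =>
    intro d ls hn hv hf
    have hk : 1 ≤ m.toNat := by omega
    by_cases hs : pvSumVals d = 0
    · have hnil : pvPos d = [] := (pvSum_zero_iff d hv).mp hs
      simp [pvOuterA, hs, pvDayIter, hnil]
    · obtain ⟨d'', ⟨hfold, hls⟩, hstep, hn'', hv''⟩ := pvPassA m hm d ls hn hv hs
      have hpos : ∀ v ∈ pvPos d, 0 < v := by
        intro v hv'
        simpa using (List.mem_filter.mp hv').2
      have hne : pvPos d ≠ [] := fun he => hs ((pvSum_zero_iff d hv).mpr he)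
      have hlt := pvNatSum_step_lt m.toNat (pvPos d) hpos hk hne
      have hrec := ih d'' (ls + 1) hn'' hv'' (by rw [hstep]; omega)
      simp only [pvOuterA, if_pos hs]
      rw [hfold, hls, hrec, hstep]
      have : pvDayIter m.toNat (f + 1) (pvPos d)
          = 1 + pvDayIter m.toNat f (pvStep m.toNat (pvPos d)) := by
        rw [pvDayIter, if_neg hne]
      rw [this]
      ring

theorem pvFuel_eq (cases : List (String × Int)) (h : ∀ p ∈ cases, 0 ≤ p.2) :
    (cases.map (fun p : String × Int => max p.2 0)).sum.toNat = pvNatSum (pvPos cases) := by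
  induction cases with
  | nil => rfl
  | cons p d ih =>
    obtain ⟨k', v'⟩ := p
    have hrest := fun q hq => h q (List.mem_cons_of_mem _ hq)
    have hsum : 0 ≤ (d.map (fun p : String × Int => max p.2 0)).sum := by
      apply List.sum_nonneg
      intro x hx
      obtain ⟨q, hq, rfl⟩ := List.mem_map.mp hx
      simp
    have := ih hrest
    simp only [pvPos, pvNatSum, List.map_cons, List.sum_cons, List.filter_cons] at *
    by_cases hp : 0 < v' <;> (try simp only [decide_eq_true_eq] at *) <;>
      [rw [if_pos hp]; rw [if_neg hp]] <;> (try simp only [List.map_cons, List.sum_cons] at *) <;> omega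

-- ---- B's loop = pvDays ----

theorem pvFM (l : List Int) (c : Int) :
    (l.map (fun v => v - 1)).filter (fun v => decide (c - 1 < v))
      = (l.filter (fun v => decide (c < v))).map (fun v => v - 1) := by
  induction l with
  | nil => rfl
  | cons v l ih =>
    by_cases hc : c < v
    · have h1 : decide (c - 1 < v - 1) = true := by simp only [decide_eq_true_eq]; omega
      have h2 : decide (c < v) = true := by simp only [decide_eq_true_eq]; exact hc
      simp only [List.map_cons, List.filter_cons, h1, h2, if_true, ih, List.map_cons]
    · have h1 : decide (c - 1 < v - 1) = false := by
        simp only [decide_eq_false_iff_not]; omega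
      have h2 : decide (c < v) = false := by simp only [decide_eq_false_iff_not]; exact hc
      simp only [List.map_cons, List.filter_cons, h1, h2, Bool.false_eq_true, if_false, ih]

theorem pvUnroll (k : Nat) (hk : 1 ≤ k) :
    ∀ (t : Nat) (vs : List Int), (∀ v ∈ vs, 0 < v) → vs ≠ [] →
    (∀ v ∈ vs.take k, (t : Int) ≤ v) →
    pvDays k vs = t + pvDays k
      (((vs.take k).filter (fun v => decide ((t : Int) < v))).map (fun v => v - (t : Int))
        ++ vs.drop k) := by
  intro t
  induction t with
  | zero =>
    intro vs hpos hne _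
    have h1 : (vs.take k).filter (fun v => decide (((0 : Nat) : Int) < v)) = vs.take k :=
      List.filter_eq_self.mpr (fun v hv => by simpa using hpos v (List.mem_of_mem_take hv))
    rw [h1]
    simp [List.take_append_drop]
  | succ t ih =>
    intro vs hpos hne hge
    have hlvs : vs.length ≠ 0 := fun hl => hne (List.length_eq_zero_iff.mp hl)
    have htake_ne : vs.take k ≠ [] := by
      intro he
      have := congrArg List.length he
      simp only [List.length_take, List.length_nil] at this
      omega
    have hstep := pvDays_step k vs hk hpos hne
    by_cases ht0 : t = 0
    · subst ht0
      have hfm := pvFM (vs.take k) 1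
      simp only [show (1 : Int) - 1 = 0 from by norm_num] at hfm
      have hst : pvStep k vs
          = ((vs.take k).filter (fun v => decide ((1 : Int) < v))).map (fun v => v - 1)
              ++ vs.drop k := by
        unfold pvStep
        rw [hfm]
      rw [hstep, hst]
      push_cast
      ring
    · have h2 : ∀ v ∈ (vs.take k).map (fun v => v - 1), 0 < v := by
        intro v hv
        obtain ⟨w, hw, rfl⟩ := List.mem_map.mp hv
        have := hge w hw
        push_cast at this
        omega
      have hfil : ((vs.take k).map (fun v => v - 1)).filter (fun v => decide (0 < v))
          = (vs.take k).map (fun v => v - 1) :=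
        List.filter_eq_self.mpr (fun v hv => by simpa using h2 v hv)
      set A := (vs.take k).map (fun v => v - 1) with hA
      have hstep' : pvStep k vs = A ++ vs.drop k := by unfold pvStep; rw [hfil]
      have hlenA : A.length = min k vs.length := by simp [hA]
      have htk : (A ++ vs.drop k).take k = A := by
        rw [List.take_append]
        have h1 : A.take k = A := List.take_of_length_le (by omega)
        by_cases hlen : vs.length ≤ k
        · have hd : vs.drop k = [] := List.drop_eq_nil_of_le hlen
          simp [h1, hd]
        · have h0 : k - A.length = 0 := by omega
          simp [h1, h0]
      have hdr : (A ++ vs.drop k).drop k = vs.drop k := by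
        rw [List.drop_append]
        have h1 : A.drop k = [] := List.drop_eq_nil_iff.mpr (by omega)
        by_cases hlen : vs.length ≤ k
        · have hd : vs.drop k = [] := List.drop_eq_nil_of_le hlen
          simp [h1, hd]
        · have h0 : k - A.length = 0 := by omega
          simp [h1, h0]
      have hpos' : ∀ v ∈ A ++ vs.drop k, 0 < v := by
        intro v hv
        rcases List.mem_append.mp hv with h | h
        · exact h2 v h
        · exact hpos v (List.mem_of_mem_drop h)
      have hne' : A ++ vs.drop k ≠ [] := by
        intro he
        have := (List.append_eq_nil_iff.mp he).1
        rw [hA] at this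
        exact htake_ne (List.map_eq_nil_iff.mp this)
      have hge' : ∀ v ∈ (A ++ vs.drop k).take k, ((t : Nat) : Int) ≤ v := by
        rw [htk, hA]
        intro v hv
        obtain ⟨w, hw, rfl⟩ := List.mem_map.mp hv
        have := hge w hw
        push_cast at this ⊢
        omega
      have hihr := ih (A ++ vs.drop k) hpos' hne' hge'
      rw [htk, hdr] at hihr
      rw [hstep, hstep', hihr]
      have hfm := pvFM (vs.take k) ((t : Int) + 1)
      simp only [show ((t : Int) + 1) - 1 = (t : Int) from by ring] at hfm
      have hAB : (A.filter (fun v => decide ((t : Int) < v))).map (fun v => v - (t : Int))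
          = ((vs.take k).filter (fun v => decide (((t + 1 : Nat) : Int) < v))).map
              (fun v => v - ((t + 1 : Nat) : Int)) := by
        rw [hA, hfm, List.map_map]
        apply List.map_congr_left
        intro v _
        simp only [Function.comp_apply]
        push_cast
        ring
      rw [hAB]
      push_cast
      ring

theorem pvBLoop_days (m : Int) (hm : 1 ≤ m) :
    ∀ (vs : List Int) (days : Int), (∀ v ∈ vs, 0 < v) →
    pvBLoop m vs days = days + pvDays m.toNat vs := by
  have hmn : m = ((m.toNat : Nat) : Int) := (Int.toNat_of_nonneg (by omega)).symm
  have hk : 1 ≤ m.toNat := by omega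
  have H : ∀ (n : Nat) (vs : List Int), vs.length ≤ n → ∀ (days : Int),
      (∀ v ∈ vs, 0 < v) → pvBLoop m vs days = days + pvDays m.toNat vs := by
    intro n
    induction n with
    | zero =>
      intro vs hl days _
      have hnil : vs = [] := List.length_eq_zero_iff.mp (by omega)
      subst hnil
      rw [pvBLoop]
      simp [pvDays_nil]
    | succ n ih =>
      intro vs hl days hpos
      by_cases hvs : vs = []
      · subst hvs
        rw [pvBLoop]
        simp [pvDays_nil]
      · have hbatch : PySem.List.slice vs none (some m) = vs.take m.toNat := by
          rw [hmn]; exact PySem.List.slice_to_natCast vs m.toNat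
        have hdrop : PySem.List.slice vs (some m) none = vs.drop m.toNat := by
          rw [hmn]; exact PySem.List.slice_from_natCast vs m.toNat
        have htake_ne : vs.take m.toNat ≠ [] := by
          intro he
          have := congrArg List.length he
          have hlvs : vs.length ≠ 0 := fun hl0 => hvs (List.length_eq_zero_iff.mp hl0)
          simp only [List.length_take, List.length_nil] at this
          omega
        have hmin_ne : PySem.List.min? (PySem.List.slice vs none (some m)) id ≠ none := by
          rw [hbatch]
          intro he
          exact htake_ne ((PySem.List.min?_eq_none_iff _ _).mp he)
        rw [pvBLoop.eq_def, if_neg hvs]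
        dsimp only
        split
        · rename_i heq
          exact absurd heq hmin_ne
        · rename_i δ heq
          rw [hbatch] at heq
          have hδmem : δ ∈ vs.take m.toNat := PySem.List.min?_mem heq
          have hδpos : 0 < δ := hpos δ (List.mem_of_mem_take hδmem)
          have hδt : ((δ.toNat : Nat) : Int) = δ := Int.toNat_of_nonneg (by omega)
          have hmin := PySem.List.min?_isMin heq
          have hnext_pos : ∀ v ∈ ((PySem.List.slice vs none (some m)).filter
              (fun v => decide (δ < v))).map (fun v => v - δ)
                ++ PySem.List.slice vs (some m) none, 0 < v := by
            intro v hv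
            rcases List.mem_append.mp hv with h | h
            · obtain ⟨w, hw, rfl⟩ := List.mem_map.mp h
              have := (List.mem_filter.mp hw).2
              simp at this
              omega
            · rw [hdrop] at h
              exact hpos v (List.mem_of_mem_drop h)
          have hlen : (((PySem.List.slice vs none (some m)).filter
              (fun v => decide (δ < v))).map (fun v => v - δ)
                ++ PySem.List.slice vs (some m) none).length ≤ n := by
            have h1 := pvSliceSplitLen vs m
            have h2 := pvMinFilterLt (PySem.List.slice vs none (some m)) δ (by rw [hbatch]; exact heq)
            simp only [List.length_append, List.length_map] at *
            omega
          rw [ih _ hlen _ hnext_pos]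
          have hur := pvUnroll m.toNat hk δ.toNat vs hpos hvs
            (by intro v hv; rw [hδt]; exact hmin v hv)
          rw [hδt] at hur
          rw [hbatch, hdrop, hur]
          ring
  exact fun vs days hpos => H vs.length vs (le_refl _) days hpos

-- ===== VERDICT (by name: the statement is the Claim_ definition above) =====
theorem pvMemItemsUpdate {κ ν : Type} [BEq κ] [LawfulBEq κ] :
    ∀ (l : List (κ × ν)) (d : PySem.Dict κ ν) (p : κ × ν),
    p ∈ (d.update l).items → p ∈ d.items ∨ p ∈ l := by
  intro l
  induction l with
  | nil => intro d p hp; exact Or.inl hp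
  | cons q l ih =>
    intro d p hp
    rcases ih (d.insert q.1 q.2) p hp with h | h
    · rcases (PySem.Dict.mem_items_insert d q.1 q.2 p).mp h with h' | h'
      · right; rw [h']; simp
      · exact Or.inl h'.1
    · right; exact List.mem_cons_of_mem _ h

theorem pvMemItemsOfList {κ ν : Type} [BEq κ] [LawfulBEq κ] (l : List (κ × ν)) (p : κ × ν)
    (hp : p ∈ (PySem.Dict.ofList l).items) : p ∈ l := by
  rcases pvMemItemsUpdate l PySem.Dict.empty p hp with h | h
  · simp [PySem.Dict.empty] at h
  · exact h

theorem legalbacklog_spec : Claim_equal_legalbacklog := by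
  intro cases m _ hpre
  obtain ⟨hv, hm | hzero⟩ := hpre
  case inr =>
    -- no case has a positive load: both programs schedule nothing and return 0
    unfold Spec_legalbacklog
    have hz : ∀ p ∈ (PySem.Dict.ofList cases).items, p.2 = 0 := by
      intro p hp
      have h1 := hv p (pvMemItemsOfList cases p hp)
      have h2 := hzero p (pvMemItemsOfList cases p hp)
      omega
    have hsum : pvSumVals (PySem.Dict.ofList cases).items = 0 := by
      apply List.sum_eq_zero
      intro x hx
      obtain ⟨q, hq, rfl⟩ := List.mem_map.mp hx
      exact hz q hq
    have hfil : ((PySem.Dict.ofList cases).items.map Prod.snd).filter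
        (fun v => decide (0 < v)) = [] := by
      apply List.filter_eq_nil_iff.mpr
      intro x hx
      obtain ⟨q, hq, rfl⟩ := List.mem_map.mp hx
      simp [hz q hq]
    have hA : legalbacklog cases m = 0 := by
      show pvOuterA m (((PySem.Dict.ofList cases).items.map
          (fun p : String × Int => max p.2 0)).sum.toNat + 1) (PySem.Dict.ofList cases).items 0
        = 0
      rw [pvOuterA, if_neg (by simpa using hsum)]
    have hB : legalbacklog_alt cases m = 0 := by
      unfold legalbacklog_alt
      rw [hfil, pvBLoop]
      simp
    rw [hA, hB]
  case inl =>
  unfold Spec_legalbacklog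
  have hn : (((PySem.Dict.ofList cases).items.map Prod.fst)).Nodup := by
    have := PySem.Dict.nodup_keys_ofList cases
    simpa [PySem.Dict.keys] using this
  have hv' : ∀ p ∈ (PySem.Dict.ofList cases).items, 0 ≤ p.2 := fun p hp =>
    hv p (pvMemItemsOfList cases p hp)
  have hA : legalbacklog cases m
      = pvDays m.toNat (pvPos (PySem.Dict.ofList cases).items) := by
    show pvOuterA m (((PySem.Dict.ofList cases).items.map
        (fun p : String × Int => max p.2 0)).sum.toNat + 1) (PySem.Dict.ofList cases).items 0
      = _
    rw [pvFuel_eq _ hv', pvOuterA_days m hm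
      (pvNatSum (pvPos (PySem.Dict.ofList cases).items) + 1) _ 0 hn hv' (by omega)]
    simp [pvDays]
  have hB : legalbacklog_alt cases m
      = pvDays m.toNat (pvPos (PySem.Dict.ofList cases).items) := by
    have := pvBLoop_days m hm (pvPos (PySem.Dict.ofList cases).items) 0
      (by intro v hv2; exact (by simpa [pvPos] using (List.mem_filter.mp hv2).2))
    simpa [legalbacklog_alt, pvPos] using this
  rw [hA, hB]
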